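-- pv_equiv track=rewrite | github.com/AssembleCat/coding_test | python/programmers/주사위 고르기.py | calculate_outcomes
-- ===== SOURCE A (Python) =====
-- def calculate_outcomes(a_dices, b_dices):
--     # A의 모든 가능한 주사위 합과 경우의 수 계산
--     a_sums = get_all_possible_sums(a_dices)
--
--     # B의 모든 가능한 주사위 합과 경우의 수 계산
--     b_sums = get_all_possible_sums(b_dices)
--
--     win, draw, lose = 0, 0, 0
--
--     # B의 합을 정렬하여 누적 합 계산을 위한 준비
--     sorted_b_sums = sorted(b_sums.items())
--     total_cases = sum(count for _, count in sorted_b_sums)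
--
--     # A의 각 합에 대해 승/무/패 계산
--     for a_sum, a_count in a_sums.items():
--         # 현재 A의 합보다 작은 B의 합이 있는 경우 (A 승리)
--         less_than_a = 0
--         equal_to_a = 0
--
--         for b_sum, b_count in sorted_b_sums:
--             if b_sum < a_sum:
--                 less_than_a += b_count
--             elif b_sum == a_sum:
--                 equal_to_a = b_count
--             else:
--                 # b_sum > a_sum인 경우는 더 이상 계산할 필요 없음
--                 break
--
--         # A가 이기는 경우: B의 합이 A보다 작은 모든 경우
--         win += a_count * less_than_a
--
--         # 무승부인 경우: A의 합과 B의 합이 같은 경우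
--         draw += a_count * equal_to_a
--
--         # A가 지는 경우: B의 합이 A보다 큰 모든 경우
--         greater_than_a = total_cases - less_than_a - equal_to_a
--         lose += a_count * greater_than_a
--
--     return win, draw, lose
--
-- def get_all_possible_sums(dices):
--     # 초기값: 빈 주사위 (합이 0, 경우의 수 1)
--     sums = {0: 1}
--
--     # 각 주사위에 대해 가능한 모든 합 계산
--     for dice in dices:
--         new_sums = {}
--         for current_sum, count in sums.items():
--             for face in dice:
--                 new_sum = current_sum + face
--                 new_sums[new_sum] = new_sums.get(new_sum, 0) + count
--         sums = new_sums
--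
--     return sums
-- ===== SOURCE B (Python) =====
-- def calculate_outcomes(a_dices, b_dices):
--     # Two-pointer sweep over both sorted sum-distributions instead of
--     # re-scanning B's sums for every A sum.
--     a_items = sorted(_sum_counts(a_dices).items())
--     b_items = sorted(_sum_counts(b_dices).items())
--     total = sum(c for _, c in b_items)
--     n = len(b_items)
--     win = draw = lose = 0
--     j = 0       # index of the first B sum not yet known to be < current a_sum
--     less = 0    # number of B cases with sum < current a_sum
--     for a_sum, a_count in a_items:
--         while j < n and b_items[j][0] < a_sum:
--             less += b_items[j][1]
--             j += 1
--         eq = b_items[j][1] if j < n and b_items[j][0] == a_sum else 0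
--         win += a_count * less
--         draw += a_count * eq
--         lose += a_count * (total - less - eq)
--     return win, draw, lose
--
-- def _sum_counts(dices):
--     sums = {0: 1}
--     for dice in dices:
--         new_sums = {}
--         for current_sum, count in sums.items():
--             for face in dice:
--                 new_sums[current_sum + face] = new_sums.get(current_sum + face, 0) + count
--         sums = new_sums
--     return sums
-- ===== Notes on version B (the rewrite author's own statement) =====
-- stated objective: faster
-- what changed: A rescans the sorted B-sum list from the start for every A sum (with an early break); B sorts both sum distributions and does a single two-pointer merge sweep, carrying the running pointer and below-count across the sorted A sums.
import Mathlib
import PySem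

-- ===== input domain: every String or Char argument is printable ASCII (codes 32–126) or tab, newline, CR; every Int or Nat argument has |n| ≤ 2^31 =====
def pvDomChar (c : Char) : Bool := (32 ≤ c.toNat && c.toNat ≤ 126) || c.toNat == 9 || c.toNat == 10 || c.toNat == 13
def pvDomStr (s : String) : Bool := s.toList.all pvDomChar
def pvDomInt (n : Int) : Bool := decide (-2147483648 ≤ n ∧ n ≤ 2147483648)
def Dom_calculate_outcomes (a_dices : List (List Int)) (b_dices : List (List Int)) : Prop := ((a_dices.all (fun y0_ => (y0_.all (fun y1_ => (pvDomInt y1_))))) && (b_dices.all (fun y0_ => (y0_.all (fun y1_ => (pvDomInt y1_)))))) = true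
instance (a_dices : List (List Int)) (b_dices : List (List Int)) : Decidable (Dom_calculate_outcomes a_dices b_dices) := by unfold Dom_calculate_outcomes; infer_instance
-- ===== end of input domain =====

-- B replaces A's per-a_sum rescans of B's sorted sums by one two-pointer merge sweep over both sorted sum-distributions (measured faster in a timing run); same return value, proved below.


-- ===== PORT A =====
-- get_all_possible_sums: DP over the dice, dict of sum -> number of ways
def getAllPossibleSums (dices : List (List Int)) : PySem.Dict Int Int :=
  dices.foldl
    (fun sums dice =>
      sums.items.foldl
        (fun new_sums p =>
          dice.foldl
            (fun ns face => ns.insert (p.1 + face) (ns.getD (p.1 + face) 0 + p.2))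
            new_sums)
        PySem.Dict.empty)
    (PySem.Dict.ofList [(0, 1)])

-- A's inner 'for b_sum, b_count in sorted_b_sums: … break' loop
def innerScanA (a_sum : Int) : List (Int × Int) → Int → Int → Int × Int
  | [], less, eq => (less, eq)
  | p :: rest, less, eq =>
    if p.1 < a_sum then innerScanA a_sum rest (less + p.2) eq
    else if p.1 == a_sum then innerScanA a_sum rest less p.2
    else (less, eq)

-- sorted(b_sums.items()): the dict keys are distinct, so Python's lexicographic
-- pair sort coincides with sorting by the first component (exact here)
def calculate_outcomes (a_dices : List (List Int)) (b_dices : List (List Int)) : Int × Int × Int :=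
  let a_sums := getAllPossibleSums a_dices
  let b_sums := getAllPossibleSums b_dices
  let sorted_b_sums := PySem.List.sorted b_sums.items (fun p => p.1) false
  let total_cases := (sorted_b_sums.map (fun p => p.2)).sum
  a_sums.items.foldl
    (fun s p =>
      let r := innerScanA p.1 sorted_b_sums 0 0
      (s.1 + p.2 * r.1, s.2.1 + p.2 * r.2, s.2.2 + p.2 * (total_cases - r.1 - r.2)))
    (0, 0, 0)

-- ===== PORT B =====
-- _sum_counts (Source B): same DP helper as A's module function
def sumCountsB (dices : List (List Int)) : PySem.Dict Int Int :=
  dices.foldl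
    (fun sums dice =>
      sums.items.foldl
        (fun new_sums p =>
          dice.foldl
            (fun ns face => ns.insert (p.1 + face) (ns.getD (p.1 + face) 0 + p.2))
            new_sums)
        PySem.Dict.empty)
    (PySem.Dict.ofList [(0, 1)])

-- the 'while j < n and b_items[j][0] < a_sum' pointer advance
def advanceB (bi : List (Int × Int)) (a_sum : Int) (j : Nat) (less : Int) : Nat × Int :=
  if h : j < bi.length then
    if (bi[j]).1 < a_sum then advanceB bi a_sum (j + 1) (less + (bi[j]).2)
    else (j, less)
  else (j, less)
termination_by bi.length - j

-- sorted(….items()): keys distinct, lexicographic pair sort = sort by first component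
def calculate_outcomes_alt (a_dices : List (List Int)) (b_dices : List (List Int)) : Int × Int × Int :=
  let a_items := PySem.List.sorted (sumCountsB a_dices).items (fun p => p.1) false
  let b_items := PySem.List.sorted (sumCountsB b_dices).items (fun p => p.1) false
  let total := (b_items.map (fun p => p.2)).sum
  let st :=
    a_items.foldl
      (fun st p =>
        let jl := advanceB b_items p.1 st.1 st.2.1
        let eq : Int :=
          if h : jl.1 < b_items.length then
            (if (b_items[jl.1]).1 == p.1 then (b_items[jl.1]).2 else 0)
          else 0
        (jl.1, jl.2, st.2.2.1 + p.2 * jl.2, st.2.2.2.1 + p.2 * eq,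
          st.2.2.2.2 + p.2 * (total - jl.2 - eq)))
      (0, 0, 0, 0, 0)
  (st.2.2.1, st.2.2.2.1, st.2.2.2.2)

-- ===== PRECONDITION & SPEC =====
def Spec_calculate_outcomes (a_dices : List (List Int)) (b_dices : List (List Int)) (out : Int × Int × Int) : Prop := out = calculate_outcomes_alt a_dices b_dices
instance (a_dices : List (List Int)) (b_dices : List (List Int)) (out : Int × Int × Int) : Decidable (Spec_calculate_outcomes a_dices b_dices out) := by unfold Spec_calculate_outcomes; infer_instance

-- ===== CLAIM (what is proved, stated in full; the proofs are below) =====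
def Claim_equal_calculate_outcomes : Prop := ∀ (a_dices : List (List Int)) (b_dices : List (List Int)), Dom_calculate_outcomes a_dices b_dices → Spec_calculate_outcomes a_dices b_dices (calculate_outcomes a_dices b_dices)

-- ===== LEMMAS AND PROOFS =====

-- total of the counts in a list of (sum, count) pairs
def totSum (l : List (Int × Int)) : Int := (l.map fun p => p.2).sum

-- total count of the pairs with key < a / key = a
def ltSum (a : Int) (l : List (Int × Int)) : Int := totSum (l.filter fun p => decide (p.1 < a))
def eqSum (a : Int) (l : List (Int × Int)) : Int := totSum (l.filter fun p => p.1 == a)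

theorem totSum_append (l₁ l₂ : List (Int × Int)) : totSum (l₁ ++ l₂) = totSum l₁ + totSum l₂ := by
  simp [totSum]

theorem ltSum_cons (a : Int) (p : Int × Int) (l : List (Int × Int)) :
    ltSum a (p :: l) = (if p.1 < a then p.2 else 0) + ltSum a l := by
  by_cases h : p.1 < a
  · simp [ltSum, totSum, h]
  · simp [ltSum, totSum, h]

theorem eqSum_cons (a : Int) (p : Int × Int) (l : List (Int × Int)) :
    eqSum a (p :: l) = (if p.1 = a then p.2 else 0) + eqSum a l := by
  by_cases h : p.1 = a
  · simp [eqSum, totSum, h]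
  · simp [eqSum, totSum, h]

theorem eqSum_append (a : Int) (l₁ l₂ : List (Int × Int)) :
    eqSum a (l₁ ++ l₂) = eqSum a l₁ + eqSum a l₂ := by
  simp [eqSum, totSum, List.filter_append]

theorem ltSum_all_gt {a : Int} {l : List (Int × Int)} (h : ∀ p ∈ l, a < p.1) : ltSum a l = 0 := by
  have hnil : l.filter (fun p => decide (p.1 < a)) = [] :=
    List.filter_eq_nil_iff.mpr (fun p hp => by have := h p hp; simp; omega)
  simp [ltSum, hnil, totSum]

theorem eqSum_all_gt {a : Int} {l : List (Int × Int)} (h : ∀ p ∈ l, a < p.1) : eqSum a l = 0 := by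
  have hnil : l.filter (fun p => p.1 == a) = [] :=
    List.filter_eq_nil_iff.mpr (fun p hp => by have := h p hp; simp; omega)
  simp [eqSum, hnil, totSum]

theorem eqSum_all_lt {a : Int} {l : List (Int × Int)} (h : ∀ p ∈ l, p.1 < a) : eqSum a l = 0 := by
  have hnil : l.filter (fun p => p.1 == a) = [] :=
    List.filter_eq_nil_iff.mpr (fun p hp => by have := h p hp; simp; omega)
  simp [eqSum, hnil, totSum]

theorem any_all_gt {a : Int} {l : List (Int × Int)} (h : ∀ p ∈ l, a < p.1) :
    l.any (fun p => p.1 == a) = false := by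
  simp only [List.any_eq_false]
  intro p hp
  have := h p hp
  simp; omega

-- A's inner scan computes the below/equal counts (on a strictly key-sorted list)
theorem innerScanA_closed (a : Int) :
    ∀ (l : List (Int × Int)), l.Pairwise (fun p q => p.1 < q.1) →
    ∀ (less eq : Int),
      innerScanA a l less eq =
        (less + ltSum a l, if l.any (fun p => p.1 == a) then eqSum a l else eq) := by
  intro l
  induction l with
  | nil => intro _ less eq; simp [innerScanA, ltSum, totSum]
  | cons p rest ih =>
    intro hpw less eq
    rcases List.pairwise_cons.mp hpw with ⟨hall, hrest⟩
    by_cases h1 : p.1 < a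
    · have hne : p.1 ≠ a := by omega
      rw [innerScanA, if_pos h1, ih hrest, ltSum_cons]
      refine Prod.ext (by simp [h1]; ring) ?_
      simp only [List.any_cons, eqSum_cons, if_neg hne]
      have hfa : (p.1 == a) = false := by simp [hne]
      rw [hfa, Bool.false_or, zero_add]
    · by_cases h2 : p.1 = a
      · have hgt : ∀ q ∈ rest, a < q.1 := fun q hq => h2 ▸ hall q hq
        rw [innerScanA, if_neg h1, if_pos (by simp [h2]), ih hrest, ltSum_cons, eqSum_cons,
          ltSum_all_gt hgt, eqSum_all_gt hgt, any_all_gt hgt]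
        simp [h2]
      · have h3 : a < p.1 := by omega
        have hgt : ∀ q ∈ p :: rest, a < q.1 := by
          intro q hq
          rcases List.mem_cons.mp hq with h | h
          · subst h; exact h3
          · exact lt_trans h3 (hall q h)
        rw [innerScanA, if_neg h1, if_neg (by simp; omega), ltSum_all_gt hgt, any_all_gt hgt]
        simp

theorem innerScanA_zero {a : Int} {l : List (Int × Int)}
    (h : l.Pairwise (fun p q => p.1 < q.1)) :
    innerScanA a l 0 0 = (ltSum a l, eqSum a l) := by
  rw [innerScanA_closed a l h 0 0]
  by_cases hany : l.any (fun p => p.1 == a) = true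
  · simp [hany]
  · have h0 : eqSum a l = 0 := by
      have hnil : l.filter (fun p => p.1 == a) = [] :=
        List.filter_eq_nil_iff.mpr
          (fun p hp hpe => (List.any_eq_false.mp (Bool.eq_false_iff.mpr hany) p hp) hpe)
      simp [eqSum, hnil, totSum]
    simp [hany, h0]

-- generic: a fold that adds f/g/h of each element to the three components
theorem foldl_triple {α : Type} (f g h : α → Int) :
    ∀ (l : List α) (s : Int × Int × Int),
      l.foldl (fun s x => (s.1 + f x, s.2.1 + g x, s.2.2 + h x)) s =
        (s.1 + (l.map f).sum, s.2.1 + (l.map g).sum, s.2.2 + (l.map h).sum) := by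
  intro l
  induction l with
  | nil => intro s; simp
  | cons x xs ih =>
    intro s
    rw [List.foldl_cons, ih]
    simp only [List.map_cons, List.sum_cons]
    refine Prod.ext (by simp; ring) (Prod.ext (by simp; ring) (by simp; ring))

-- A's outer fold, in closed form
theorem foldA_closed (bi : List (Int × Int)) (hb : bi.Pairwise (fun p q => p.1 < q.1))
    (total : Int) (ai : List (Int × Int)) (s : Int × Int × Int) :
      ai.foldl
        (fun s p =>
          (s.1 + p.2 * (innerScanA p.1 bi 0 0).1,
           s.2.1 + p.2 * (innerScanA p.1 bi 0 0).2,
           s.2.2 + p.2 * (total - (innerScanA p.1 bi 0 0).1 - (innerScanA p.1 bi 0 0).2)))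
        s =
      (s.1 + (ai.map fun p => p.2 * ltSum p.1 bi).sum,
       s.2.1 + (ai.map fun p => p.2 * eqSum p.1 bi).sum,
       s.2.2 + (ai.map fun p => p.2 * (total - ltSum p.1 bi - eqSum p.1 bi)).sum) := by
  have hfun :
      (fun (s : Int × Int × Int) (p : Int × Int) =>
        (s.1 + p.2 * (innerScanA p.1 bi 0 0).1,
         s.2.1 + p.2 * (innerScanA p.1 bi 0 0).2,
         s.2.2 + p.2 * (total - (innerScanA p.1 bi 0 0).1 - (innerScanA p.1 bi 0 0).2))) =
      (fun (s : Int × Int × Int) (p : Int × Int) =>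
        (s.1 + (fun p : Int × Int => p.2 * ltSum p.1 bi) p,
         s.2.1 + (fun p : Int × Int => p.2 * eqSum p.1 bi) p,
         s.2.2 + (fun p : Int × Int => p.2 * (total - ltSum p.1 bi - eqSum p.1 bi)) p)) := by
    funext s p
    rw [innerScanA_zero hb]
  rw [hfun, foldl_triple]

-- B's 'while' pointer advance, as take/drop arithmetic (fuel induction)
theorem advanceB_fuel (bi : List (Int × Int)) (a : Int) :
    ∀ (n j : Nat) (less : Int), bi.length - j ≤ n → j ≤ bi.length →
      advanceB bi a j less =
        (j + ((bi.drop j).takeWhile fun p => decide (p.1 < a)).length,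
         less + totSum ((bi.drop j).takeWhile fun p => decide (p.1 < a))) := by
  intro n
  induction n with
  | zero =>
    intro j less hn hj
    have hj' : j = bi.length := by omega
    subst hj'
    rw [advanceB, dif_neg (by omega)]
    simp [List.drop_length, totSum]
  | succ n ih =>
    intro j less hn hj
    by_cases h : j < bi.length
    · have hd : bi.drop j = bi[j] :: bi.drop (j + 1) := (List.getElem_cons_drop h).symm
      rw [advanceB, dif_pos h]
      by_cases hlt : (bi[j]).1 < a
      · rw [if_pos hlt, ih (j + 1) _ (by omega) (by omega), hd,
          List.takeWhile_cons_of_pos (by simp [hlt])]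
        simp only [List.length_cons, totSum, List.map_cons, List.sum_cons]
        refine Prod.ext (by omega) (by simp; ring)
      · rw [if_neg hlt, hd, List.takeWhile_cons_of_neg (by simp [hlt])]
        simp [totSum]
    · have hj' : j = bi.length := by omega
      subst hj'
      rw [advanceB, dif_neg (by omega)]
      simp [List.drop_length, totSum]

theorem advanceB_eq (bi : List (Int × Int)) (a : Int) (j : Nat) (less : Int)
    (hj : j ≤ bi.length) :
    advanceB bi a j less =
      (j + ((bi.drop j).takeWhile fun p => decide (p.1 < a)).length,
       less + totSum ((bi.drop j).takeWhile fun p => decide (p.1 < a))) :=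
  advanceB_fuel bi a (bi.length - j) j less le_rfl hj

-- on a strictly key-sorted list, takeWhile (key < a) is filter (key < a)
theorem takeWhile_eq_filter_sorted (a : Int) :
    ∀ (l : List (Int × Int)), l.Pairwise (fun p q => p.1 < q.1) →
      l.takeWhile (fun p => decide (p.1 < a)) = l.filter (fun p => decide (p.1 < a)) := by
  intro l
  induction l with
  | nil => intro _; simp
  | cons p rest ih =>
    intro hpw
    rcases List.pairwise_cons.mp hpw with ⟨hall, hrest⟩
    by_cases h : p.1 < a
    · rw [List.takeWhile_cons_of_pos (by simp [h]), List.filter_cons_of_pos (by simp [h]), ih hrest]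
    · rw [List.takeWhile_cons_of_neg (by simp [h]), List.filter_cons_of_neg (by simp [h])]
      have hnil : rest.filter (fun p => decide (p.1 < a)) = [] :=
        List.filter_eq_nil_iff.mpr (fun q hq => by have := hall q hq; simp; omega)
      rw [hnil]

-- the element B inspects at the stop position carries exactly the equal count
theorem eqAt (a : Int) (bi : List (Int × Int)) (hb : bi.Pairwise (fun p q => p.1 < q.1)) :
    (if h : ((bi.takeWhile fun p => decide (p.1 < a)).length) < bi.length then
       (if (bi[(bi.takeWhile fun p => decide (p.1 < a)).length].1 == a) = true then
          bi[(bi.takeWhile fun p => decide (p.1 < a)).length].2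
        else 0)
     else 0) = eqSum a bi := by
  have hTD : (bi.takeWhile fun p => decide (p.1 < a)) ++ (bi.dropWhile fun p => decide (p.1 < a)) = bi :=
    List.takeWhile_append_dropWhile
  have hT0 : eqSum a (bi.takeWhile fun p => decide (p.1 < a)) = 0 :=
    eqSum_all_lt (fun p hp => by have := List.mem_takeWhile_imp hp; simpa using this)
  cases hD : (bi.dropWhile fun p => decide (p.1 < a)) with
  | nil =>
    have hlen : (bi.takeWhile fun p => decide (p.1 < a)).length = bi.length := by
      conv_rhs => rw [← hTD]
      simp [hD]
    rw [dif_neg (by omega)]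
    have : eqSum a bi = 0 := by
      conv_lhs => rw [← hTD]
      rw [eqSum_append, hD, hT0]
      simp [eqSum, totSum]
    omega
  | cons q r =>
    have hlen : (bi.takeWhile fun p => decide (p.1 < a)).length < bi.length := by
      conv_rhs => rw [← hTD]
      simp [hD]
    have hget : bi[(bi.takeWhile fun p => decide (p.1 < a)).length]'hlen = q := by
      have hbi : bi = (bi.takeWhile fun p => decide (p.1 < a)) ++ q :: r := by
        rw [← hD, List.takeWhile_append_dropWhile]
      exact List.getElem_of_append hbi rfl
    have hqa : ¬ q.1 < a := by
      have hne : (bi.dropWhile fun p => decide (p.1 < a)) ≠ [] := by simp [hD]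
      have hhd := List.head_dropWhile_not (fun p : Int × Int => decide (p.1 < a)) hne
      have hh : (bi.dropWhile fun p : Int × Int => decide (p.1 < a)).head hne = q := by
        simp [hD]
      rw [hh] at hhd
      simpa using hhd
    have hqr : ∀ x ∈ r, q.1 < x.1 := by
      have hpw2 : (q :: r).Pairwise (fun p q => p.1 < q.1) := by
      
        have hbi : bi = (bi.takeWhile fun p => decide (p.1 < a)) ++ q :: r := by
          rw [← hD, List.takeWhile_append_dropWhile]
        have hb2 := hb
        rw [hbi] at hb2
        exact List.Pairwise.sublist (List.sublist_append_right _ _) hb2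
      exact (List.pairwise_cons.mp hpw2).1
    have hsum : eqSum a bi = eqSum a (q :: r) := by
      conv_lhs => rw [← hTD, hD]
      rw [eqSum_append, hT0]
      ring
    rw [dif_pos hlen]
    by_cases hq : q.1 = a
    · have h0 : eqSum a r = 0 := eqSum_all_gt (fun x hx => hq ▸ hqr x hx)
      rw [hsum, eqSum_cons, if_pos hq, h0, hget, if_pos (by simp [hq])]
      ring
    · have hgt : q.1 > a := by omega
      have h0 : eqSum a r = 0 := eqSum_all_gt (fun x hx => lt_trans hgt (hqr x hx))
      rw [hsum, eqSum_cons, if_neg hq, h0, hget, if_neg (by simp [hq])]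
      ring
-- B's outer fold, in closed form
theorem foldB_closed (bi : List (Int × Int)) (hb : bi.Pairwise (fun p q => p.1 < q.1))
    (total : Int) :
    ∀ (ai : List (Int × Int)), ai.Pairwise (fun p q => p.1 < q.1) →
    ∀ (st : Nat × Int × Int × Int × Int), st.1 ≤ bi.length →
      (∀ x ∈ bi.take st.1, ∀ q ∈ ai, x.1 < q.1) → st.2.1 = totSum (bi.take st.1) →
      (ai.foldl
        (fun st p =>
          ((advanceB bi p.1 st.1 st.2.1).1,
           (advanceB bi p.1 st.1 st.2.1).2,
           st.2.2.1 + p.2 * (advanceB bi p.1 st.1 st.2.1).2,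
           st.2.2.2.1 + p.2 *
             (if h : (advanceB bi p.1 st.1 st.2.1).1 < bi.length then
               (if (bi[(advanceB bi p.1 st.1 st.2.1).1].1 == p.1) = true then
                  bi[(advanceB bi p.1 st.1 st.2.1).1].2
                else 0)
              else 0),
           st.2.2.2.2 + p.2 *
             (total - (advanceB bi p.1 st.1 st.2.1).2 -
              (if h : (advanceB bi p.1 st.1 st.2.1).1 < bi.length then
                (if (bi[(advanceB bi p.1 st.1 st.2.1).1].1 == p.1) = true then
                   bi[(advanceB bi p.1 st.1 st.2.1).1].2
                 else 0)
               else 0)))) st).2.2 =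
      (st.2.2.1 + (ai.map fun p => p.2 * ltSum p.1 bi).sum,
       st.2.2.2.1 + (ai.map fun p => p.2 * eqSum p.1 bi).sum,
       st.2.2.2.2 + (ai.map fun p => p.2 * (total - ltSum p.1 bi - eqSum p.1 bi)).sum) := by
  intro ai
  induction ai with
  | nil => intro _ st _ _ _; simp
  | cons p rest ih =>
    intro hpw st hj hpre hless
    rcases List.pairwise_cons.mp hpw with ⟨hall, hrest⟩
    have hpre1 : ∀ x ∈ bi.take st.1, x.1 < p.1 :=
      fun x hx => hpre x hx p (List.mem_cons_self)
    have hsplit : bi.takeWhile (fun q => decide (q.1 < p.1)) =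
        bi.take st.1 ++ ((bi.drop st.1).takeWhile fun q => decide (q.1 < p.1)) := by
      calc bi.takeWhile (fun q => decide (q.1 < p.1))
          = ((bi.take st.1 ++ bi.drop st.1).takeWhile fun q => decide (q.1 < p.1)) := by
            rw [List.take_append_drop]
        _ = _ := List.takeWhile_append_of_pos (by intro x hx; simpa using hpre1 x hx)
    have hTlen : (bi.takeWhile fun q => decide (q.1 < p.1)).length =
        st.1 + ((bi.drop st.1).takeWhile fun q => decide (q.1 < p.1)).length := by
      rw [hsplit]; simp [List.length_append, List.length_take, min_eq_left hj]
    have hTsum : totSum (bi.takeWhile fun q => decide (q.1 < p.1)) =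
        st.2.1 + totSum ((bi.drop st.1).takeWhile fun q => decide (q.1 < p.1)) := by
      rw [hsplit, totSum_append, hless]
    have hTfil : totSum (bi.takeWhile fun q => decide (q.1 < p.1)) = ltSum p.1 bi := by
      rw [takeWhile_eq_filter_sorted p.1 bi hb]; rfl
    have hadv : advanceB bi p.1 st.1 st.2.1 =
        ((bi.takeWhile fun q => decide (q.1 < p.1)).length, ltSum p.1 bi) := by
      rw [advanceB_eq bi p.1 st.1 st.2.1 hj]
      refine Prod.ext (by rw [hTlen]) (by rw [← hTfil, hTsum])
    have hjT : (bi.takeWhile fun q => decide (q.1 < p.1)).length ≤ bi.length :=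
      (List.takeWhile_prefix _).length_le
    have htake : bi.take (bi.takeWhile fun q => decide (q.1 < p.1)).length =
        (bi.takeWhile fun q => decide (q.1 < p.1)) :=
      (List.prefix_iff_eq_take.mp (List.takeWhile_prefix _)).symm
    have heq := eqAt p.1 bi hb
    rw [List.foldl_cons]
    simp only [hadv, heq]
    rw [ih hrest _ hjT
      (by
        intro x hx q hq
        rw [htake] at hx
        have hxa : x.1 < p.1 := by simpa using List.mem_takeWhile_imp hx
        exact lt_trans hxa (hall q hq))
      (by simp [htake, hTfil])]
    simp only [List.map_cons, List.sum_cons]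
    refine Prod.ext (by simp; ring) (Prod.ext (by simp; ring) (by simp; ring))

-- any insert-style loop keeps the key list duplicate-free
theorem nodup_keys_preserve {α : Type} (g : PySem.Dict Int Int → α → PySem.Dict Int Int)
    (hstep : ∀ d x, d.keys.Nodup → (g d x).keys.Nodup) :
    ∀ (l : List α) (d : PySem.Dict Int Int), d.keys.Nodup → (l.foldl g d).keys.Nodup := by
  intro l
  induction l with
  | nil => intro d h; simpa
  | cons x xs ih => intro d h; rw [List.foldl_cons]; exact ih _ (hstep d x h)

theorem nodup_keys_gaps (dices : List (List Int)) : (getAllPossibleSums dices).keys.Nodup := by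
  unfold getAllPossibleSums
  apply nodup_keys_preserve
  · intro d dice _
    apply nodup_keys_preserve
    · intro d2 p h2
      exact PySem.Dict.nodup_keys_foldl_insert_key dice (fun face => p.1 + face)
        (fun ns face => ns.getD (p.1 + face) 0 + p.2) d2 h2
    · exact PySem.Dict.nodup_keys_empty
  · exact PySem.Dict.nodup_keys_ofList _

-- sorting a nodup-keyed item list by key gives a strictly key-increasing list
theorem sortedItems_pairwise (d : PySem.Dict Int Int) (h : d.keys.Nodup) :
    (PySem.List.sorted d.items (fun p => p.1) false).Pairwise (fun p q => p.1 < q.1) := by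
  have hle : (PySem.List.sorted d.items (fun p => p.1) false).Pairwise
      (fun p q => p.1 ≤ q.1) := PySem.List.sorted_pairwise d.items (fun p => p.1)
  have hperm : (PySem.List.sorted d.items (fun p => p.1) false).Perm d.items :=
    PySem.List.sorted_perm d.items (fun p => p.1) false
  have hkeys : (d.items.map (fun p => p.1)).Nodup := by
    have hk : d.keys = d.items.map (fun p => p.1) := rfl
    rwa [hk] at h
  have hnd : ((PySem.List.sorted d.items (fun p => p.1) false).map (fun p => p.1)).Nodup :=
    ((hperm.map _).nodup_iff).mpr hkeys
  have hne : (PySem.List.sorted d.items (fun p => p.1) false).Pairwise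
      (fun p q => p.1 ≠ q.1) := List.pairwise_map.mp hnd
  exact (hle.and hne).imp (fun hpq => lt_of_le_of_ne hpq.1 hpq.2)
-- ===== VERDICT (by name: the statement is the Claim_ definition above) =====
theorem calculate_outcomes_spec : Claim_equal_calculate_outcomes := by
  intro a b _
  show calculate_outcomes a b = calculate_outcomes_alt a b
  have hBA : sumCountsB = getAllPossibleSums := rfl
  simp only [calculate_outcomes, calculate_outcomes_alt, hBA]
  have hbpw := sortedItems_pairwise (getAllPossibleSums b) (nodup_keys_gaps b)
  have haipw := sortedItems_pairwise (getAllPossibleSums a) (nodup_keys_gaps a)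
  rw [foldA_closed _ hbpw]
  have hB := foldB_closed _ hbpw
    ((List.map (fun p => p.2) (PySem.List.sorted (getAllPossibleSums b).items (fun p => p.1) false)).sum)
    _ haipw (0, 0, 0, 0, 0) (by simp) (by simp) (by simp [totSum])
  rw [hB]
  have hperm : (PySem.List.sorted (getAllPossibleSums a).items (fun p => p.1) false).Perm
      (getAllPossibleSums a).items := PySem.List.sorted_perm (getAllPossibleSums a).items (fun p => p.1) false
  refine Prod.ext ?_ (Prod.ext ?_ ?_) <;>
    exact congrArg (HAdd.hAdd 0) ((hperm.map _).sum_eq).symm
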